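-- pv_equiv track=rewrite | github.com/elshafe3y/algorithm | algorithm2a.py | edit_distance_with_Backtracking
-- ===== SOURCE A (Python) =====
-- def edit_distance_with_Backtracking(word1, word2):
--     m, n = len(word1), len(word2)
--
--     dp = [[0] * (n + 1) for _ in range(m + 1)] # DP table
--
--     for i in range(m + 1):
--         dp[i][0] = i # If word2 is empty
--     for j in range(n + 1):
--         dp[0][j] = j # If word1 is empty
--
--     for i in range(1, m + 1):
--         for j in range(1, n + 1):
--             if word1[i - 1] == word2[j - 1]: # If characters are the same, ignore them
--                 dp[i][j] = dp[i - 1][j - 1]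
--             else:
--                 dp[i][j] = 1 + min(
--                     dp[i - 1][j],     # Insert
--                     dp[i][j - 1],     # Delete
--                     dp[i - 1][j - 1]  # Replace
--                 )
--
--     steps = []
--     i, j = m, n
--     while i > 0 or j > 0:
--         if i > 0 and j > 0 and word1[i - 1] == word2[j - 1]: # Characters are the same
--             i -= 1
--             j -= 1
--         elif i > 0 and j > 0 and dp[i][j] == dp[i - 1][j - 1] + 1: # Replace
--             steps.append(f"Replace '{word2[j-1]}' with '{word1[i-1]}'") #Display replace operation
--             i -= 1
--             j -= 1
--         elif i > 0 and dp[i][j] == dp[i - 1][j] + 1: # Insert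
--             steps.append(f"Insert '{word1[i-1]}'") #Display insert operation
--             i -= 1
--         else: # Delete
--             steps.append(f"Delete '{word2[j-1]}'") #Display delete operation
--             j -= 1
--
--     steps.reverse()
--     return dp[m][n], steps
-- ===== SOURCE B (Python) =====
-- def edit_distance_with_Backtracking(word1, word2):
--     m, n = len(word1), len(word2)
--     # move codes: 0 match, 1 replace, 2 insert (consumes word1[i-1]), 3 delete (consumes word2[j-1])
--     move = [[0] * (n + 1) for _ in range(m + 1)]
--     for i in range(1, m + 1):
--         move[i][0] = 2
--     for j in range(1, n + 1):
--         move[0][j] = 3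
--     prev = list(range(n + 1))
--     for i in range(1, m + 1):
--         cur = [i] + [0] * n
--         for j in range(1, n + 1):
--             if word1[i - 1] == word2[j - 1]:
--                 cur[j] = prev[j - 1]
--             else:
--                 d, u, l = prev[j - 1], prev[j], cur[j - 1]
--                 best = min(d, u, l)
--                 cur[j] = best + 1
--                 move[i][j] = 1 if d == best else (2 if u == best else 3)
--         prev = cur
--     steps = []
--     i, j = m, n
--     while i > 0 or j > 0:
--         mv = move[i][j]
--         if mv == 0:
--             i -= 1; j -= 1
--         elif mv == 1:
--             steps.append(f"Replace '{word2[j-1]}' with '{word1[i-1]}'")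
--             i -= 1; j -= 1
--         elif mv == 2:
--             steps.append(f"Insert '{word1[i-1]}'")
--             i -= 1
--         else:
--             steps.append(f"Delete '{word2[j-1]}'")
--             j -= 1
--     steps.reverse()
--     return prev[n], steps
-- ===== Notes on version B (the rewrite author's own statement) =====
-- stated objective: alternative
-- what changed: B records a per-cell move table during the forward DP pass (keeping only two DP rows) and reconstructs the steps by following the stored moves, instead of A's full (m+1)x(n+1) DP table plus value-comparison backtracking.
import Mathlib
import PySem

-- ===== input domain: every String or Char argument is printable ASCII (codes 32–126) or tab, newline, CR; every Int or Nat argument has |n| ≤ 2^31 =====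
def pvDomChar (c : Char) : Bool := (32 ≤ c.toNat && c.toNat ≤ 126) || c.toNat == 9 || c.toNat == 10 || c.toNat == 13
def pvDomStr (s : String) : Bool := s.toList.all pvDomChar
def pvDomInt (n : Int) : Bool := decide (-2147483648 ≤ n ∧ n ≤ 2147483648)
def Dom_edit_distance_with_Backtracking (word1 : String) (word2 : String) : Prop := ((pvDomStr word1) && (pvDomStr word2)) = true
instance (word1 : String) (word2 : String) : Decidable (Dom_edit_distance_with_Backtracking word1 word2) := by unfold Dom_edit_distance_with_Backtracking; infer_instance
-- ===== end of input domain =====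

-- B replaces A's value-driven backtracking over the full DP table by a per-cell move table
-- recorded during the forward pass (kept with only two DP rows); same return value (objective: alternative).

-- ===== PORT A =====
-- the while-loop of A, fuel-guarded for totality only (fuel = m+n suffices; each iteration lowers i+j)
def pvBacktrackA (w1 w2 : List Char) (dp : List (List Int)) : Nat → Nat → Nat → List String → List String
  | 0, _, _, steps => steps
  | fuel+1, i, j, steps =>
    if i > 0 ∨ j > 0 then
      if i > 0 ∧ j > 0 ∧ w1.getD (i-1) ' ' = w2.getD (j-1) ' ' then
        pvBacktrackA w1 w2 dp fuel (i-1) (j-1) steps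
      else if i > 0 ∧ j > 0 ∧ (dp.getD i []).getD j 0 = (dp.getD (i-1) []).getD (j-1) 0 + 1 then
        pvBacktrackA w1 w2 dp fuel (i-1) (j-1)
          (steps ++ ["Replace '" ++ String.ofList [w2.getD (j-1) ' '] ++ "' with '" ++ String.ofList [w1.getD (i-1) ' '] ++ "'"])
      else if i > 0 ∧ (dp.getD i []).getD j 0 = (dp.getD (i-1) []).getD j 0 + 1 then
        pvBacktrackA w1 w2 dp fuel (i-1) j (steps ++ ["Insert '" ++ String.ofList [w1.getD (i-1) ' '] ++ "'"])
      else
        pvBacktrackA w1 w2 dp fuel i (j-1) (steps ++ ["Delete '" ++ String.ofList [w2.getD (j-1) ' '] ++ "'"])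
    else steps

def edit_distance_with_Backtracking (word1 : String) (word2 : String) : Int × List String :=
  let w1 := word1.toList
  let w2 := word2.toList
  let m := w1.length
  let n := w2.length
  let dp0 : List (List Int) := (List.range (m+1)).map (fun _ => List.replicate (n+1) (0:Int))
  let dp1 := (List.range (m+1)).foldl (fun dp i => dp.set i ((dp.getD i []).set 0 (i:Int))) dp0
  let dp2 := (List.range (n+1)).foldl (fun dp j => dp.set 0 ((dp.getD 0 []).set j (j:Int))) dp1
  let dp := (List.range' 1 m).foldl (fun dp i =>
      (List.range' 1 n).foldl (fun dp j =>
        let v : Int :=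
          if w1.getD (i-1) ' ' = w2.getD (j-1) ' ' then (dp.getD (i-1) []).getD (j-1) 0
          else 1 + min (min ((dp.getD (i-1) []).getD j 0) ((dp.getD i []).getD (j-1) 0))
                       ((dp.getD (i-1) []).getD (j-1) 0)
        dp.set i ((dp.getD i []).set j v)) dp) dp2
  let steps := pvBacktrackA w1 w2 dp (m+n) m n []
  ((dp.getD m []).getD n 0, steps.reverse)

-- ===== PORT B =====
-- the while-loop of B, following the recorded moves; fuel-guarded for totality only
def pvBacktrackB (w1 w2 : List Char) (mv : List (List Nat)) : Nat → Nat → Nat → List String → List String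
  | 0, _, _, steps => steps
  | fuel+1, i, j, steps =>
    if i > 0 ∨ j > 0 then
      let c := (mv.getD i []).getD j 0
      if c = 0 then pvBacktrackB w1 w2 mv fuel (i-1) (j-1) steps
      else if c = 1 then
        pvBacktrackB w1 w2 mv fuel (i-1) (j-1)
          (steps ++ ["Replace '" ++ String.ofList [w2.getD (j-1) ' '] ++ "' with '" ++ String.ofList [w1.getD (i-1) ' '] ++ "'"])
      else if c = 2 then
        pvBacktrackB w1 w2 mv fuel (i-1) j (steps ++ ["Insert '" ++ String.ofList [w1.getD (i-1) ' '] ++ "'"])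
      else
        pvBacktrackB w1 w2 mv fuel i (j-1) (steps ++ ["Delete '" ++ String.ofList [w2.getD (j-1) ' '] ++ "'"])
    else steps

def edit_distance_with_Backtracking_alt (word1 : String) (word2 : String) : Int × List String :=
  let w1 := word1.toList
  let w2 := word2.toList
  let m := w1.length
  let n := w2.length
  let move0 : List (List Nat) := (List.range (m+1)).map (fun _ => List.replicate (n+1) 0)
  let move1 := (List.range' 1 m).foldl (fun mv i => mv.set i ((mv.getD i []).set 0 2)) move0
  let move2 := (List.range' 1 n).foldl (fun mv j => mv.set 0 ((mv.getD 0 []).set j 3)) move1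
  let prev0 : List Int := (List.range (n+1)).map (fun (j : Nat) => (j:Int))
  let st := (List.range' 1 m).foldl (fun (st : List Int × List (List Nat)) (i : Nat) =>
      let cur0 : List Int := (i:Int) :: List.replicate n 0
      (List.range' 1 n).foldl (fun (st2 : List Int × List (List Nat)) (j : Nat) =>
          if w1.getD (i-1) ' ' = w2.getD (j-1) ' ' then
            (st2.1.set j (st.1.getD (j-1) 0), st2.2)
          else
            let d := st.1.getD (j-1) 0
            let u := st.1.getD j 0
            let l := st2.1.getD (j-1) 0
            let best := min d (min u l)
            (st2.1.set j (best+1),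
             st2.2.set i ((st2.2.getD i []).set j (if d = best then 1 else if u = best then 2 else 3)))
        ) (cur0, st.2)) (prev0, move2)
  let steps := pvBacktrackB w1 w2 st.2 (m+n) m n []
  (st.1.getD n 0, steps.reverse)

-- ===== PRECONDITION & SPEC =====
def Spec_edit_distance_with_Backtracking (word1 : String) (word2 : String) (out : Int × List String) : Prop := out = edit_distance_with_Backtracking_alt word1 word2
instance (word1 : String) (word2 : String) (out : Int × List String) : Decidable (Spec_edit_distance_with_Backtracking word1 word2 out) := by unfold Spec_edit_distance_with_Backtracking; infer_instance

-- ===== CLAIM (what is proved, stated in full; the proofs are below) =====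
def Claim_equal_edit_distance_with_Backtracking : Prop := ∀ (word1 : String) (word2 : String), Dom_edit_distance_with_Backtracking word1 word2 → Spec_edit_distance_with_Backtracking word1 word2 (edit_distance_with_Backtracking word1 word2)

-- ===== LEMMAS AND PROOFS =====

theorem pvGetDSet {α : Type} (l : List α) (i t : Nat) (v d : α) :
    (l.set i v).getD t d = if t = i ∧ i < l.length then v else l.getD t d := by
  simp only [List.getD_eq_getElem?_getD, List.getElem?_set]
  have hcase : i = t ∨ ¬ i = t := em _
  rcases hcase with h1|h1
  · subst h1
    by_cases h2 : i < l.length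
    · simp [h2]
    · simp [h2]
  · have h1' : ¬ t = i := fun h => h1 h.symm
    simp [h1, h1']

theorem pvGetDMapRange {α : Type} (f : Nat → α) (N t : Nat) (d : α) :
    ((List.range N).map f).getD t d = if t < N then f t else d := by
  simp only [List.getD_eq_getElem?_getD, List.getElem?_map]
  rcases Nat.lt_or_ge t N with h|h
  · simp [h]
  · simp [h]

theorem pvFoldSetLen {α : Type} (dflt : α) (g : Nat → α → α) :
    ∀ (L : List Nat) (dp : List α),
      (L.foldl (fun d i => d.set i (g i (d.getD i dflt))) dp).length = dp.length := by
  intro L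
  induction L with
  | nil => intro dp; rfl
  | cons a L ih => intro dp; rw [List.foldl_cons, ih, List.length_set]

theorem pvFoldSet {α : Type} (dflt : α) (g : Nat → α → α) :
    ∀ (k a : Nat) (dp : List α) (t : Nat),
      ((List.range' a k).foldl (fun d i => d.set i (g i (d.getD i dflt))) dp).getD t dflt
        = if a ≤ t ∧ t < a + k ∧ t < dp.length then g t (dp.getD t dflt) else dp.getD t dflt := by
  intro k
  induction k with
  | zero => intro a dp t; simp; intro h1 h2; omega
  | succ k ih =>
    intro a dp t
    rw [List.range'_succ, List.foldl_cons, ih]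
    rw [List.length_set, pvGetDSet]
    by_cases ht : t = a
    · subst ht
      by_cases hlen : t < dp.length
      · rw [if_neg (by omega), if_pos ⟨rfl, hlen⟩, if_pos ⟨le_refl t, by omega, hlen⟩]
      · rw [if_neg (by omega), if_neg (by omega), if_neg (by omega)]
    · simp only [ht, false_and, if_false]
      by_cases hin : a ≤ t ∧ t < a + (k+1) ∧ t < dp.length
      · rw [if_pos (by omega : a + 1 ≤ t ∧ t < a + 1 + k ∧ t < dp.length), if_pos hin]
      · rw [if_neg (by omega : ¬(a + 1 ≤ t ∧ t < a + 1 + k ∧ t < dp.length)), if_neg hin]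

theorem pvFoldSetZero {α : Type} (dflt : α) (g : Nat → α → α) :
    ∀ (L : List Nat) (dp : List α), 0 < dp.length →
      (L.foldl (fun d k => d.set 0 (g k (d.getD 0 dflt))) dp)
        = dp.set 0 (L.foldl (fun r k => g k r) (dp.getD 0 dflt)) := by
  intro L
  induction L with
  | nil =>
    intro dp h
    rw [List.foldl_nil, List.foldl_nil, List.getD_eq_getElem dp dflt h, List.set_getElem_self]
  | cons a L ih =>
    intro dp h
    rw [List.foldl_cons, ih _ (by simpa using h), List.set_set, List.foldl_cons]
    congr 1
    rw [pvGetDSet, if_pos ⟨rfl, h⟩]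

def pvDpF (w1 w2 : List Char) : Nat → Nat → Int
  | 0, j => (j : Int)
  | i+1, 0 => (i : Int) + 1
  | i+1, j+1 =>
    if w1.getD i ' ' = w2.getD j ' ' then pvDpF w1 w2 i j
    else 1 + min (min (pvDpF w1 w2 i (j+1)) (pvDpF w1 w2 (i+1) j)) (pvDpF w1 w2 i j)
  termination_by i j => i + j

theorem pvDpF_left0 (w1 w2 : List Char) (j : Nat) : pvDpF w1 w2 0 j = (j : Int) := by
  cases j <;> simp [pvDpF]

theorem pvDpF_right0 (w1 w2 : List Char) (i : Nat) : pvDpF w1 w2 i 0 = (i : Int) := by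
  cases i with
  | zero => simp [pvDpF]
  | succ i => simp [pvDpF]

theorem pvDpF_ss (w1 w2 : List Char) (i j : Nat) :
    pvDpF w1 w2 (i+1) (j+1) =
      if w1.getD i ' ' = w2.getD j ' ' then pvDpF w1 w2 i j
      else 1 + min (min (pvDpF w1 w2 i (j+1)) (pvDpF w1 w2 (i+1) j)) (pvDpF w1 w2 i j) := by
  conv_lhs => rw [pvDpF]

def pvMovF (w1 w2 : List Char) (i j : Nat) : Nat :=
  if i = 0 then (if j = 0 then 0 else 3)
  else if j = 0 then 2
  else if w1.getD (i-1) ' ' = w2.getD (j-1) ' ' then 0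
  else
    let d := pvDpF w1 w2 (i-1) (j-1)
    let u := pvDpF w1 w2 (i-1) j
    let l := pvDpF w1 w2 i (j-1)
    if d = min d (min u l) then 1 else if u = min d (min u l) then 2 else 3

def pvInvA (w1 w2 : List Char) (i j : Nat) (dp : List (List Int)) : Prop :=
  dp.length = w1.length + 1 ∧
  (∀ t, t ≤ w1.length → (dp.getD t []).length = w2.length + 1) ∧
  (∀ t, t < i → ∀ j', j' ≤ w2.length → (dp.getD t []).getD j' 0 = pvDpF w1 w2 t j') ∧
  (∀ j', j' ≤ j → (dp.getD i []).getD j' 0 = pvDpF w1 w2 i j') ∧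
  (∀ t, i < t → t ≤ w1.length → (dp.getD t []).getD 0 0 = (t : Int))

theorem pvStepA (w1 w2 : List Char) (i j : Nat) (dp : List (List Int))
    (hi1 : 1 ≤ i) (hi : i ≤ w1.length) (hj : j + 1 ≤ w2.length)
    (h : pvInvA w1 w2 i j dp) :
    pvInvA w1 w2 i (j+1) (dp.set i ((dp.getD i []).set (j+1)
      (if w1.getD (i-1) ' ' = w2.getD ((j+1)-1) ' ' then (dp.getD (i-1) []).getD ((j+1)-1) 0
       else 1 + min (min ((dp.getD (i-1) []).getD (j+1) 0) ((dp.getD i []).getD ((j+1)-1) 0))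
                    ((dp.getD (i-1) []).getD ((j+1)-1) 0)))) := by
  obtain ⟨hlen, hrow, hfull, hpart, hinit⟩ := h
  -- the written value is pvDpF w1 w2 i (j+1)
  have hv : (if w1.getD (i-1) ' ' = w2.getD ((j+1)-1) ' ' then (dp.getD (i-1) []).getD ((j+1)-1) 0
       else 1 + min (min ((dp.getD (i-1) []).getD (j+1) 0) ((dp.getD i []).getD ((j+1)-1) 0))
                    ((dp.getD (i-1) []).getD ((j+1)-1) 0)) = pvDpF w1 w2 i (j+1) := by
    obtain ⟨i', rfl⟩ : ∃ i', i = i' + 1 := ⟨i - 1, by omega⟩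
    have e1 : (dp.getD i' []).getD j 0 = pvDpF w1 w2 i' j := hfull i' (by omega) j (by omega)
    have e2 : (dp.getD i' []).getD (j+1) 0 = pvDpF w1 w2 i' (j+1) := hfull i' (by omega) (j+1) (by omega)
    have e3 : (dp.getD (i'+1) []).getD j 0 = pvDpF w1 w2 (i'+1) j := hpart j (le_refl j)
    simp only [Nat.add_sub_cancel, e1, e2, e3, pvDpF_ss]
  rw [hv]
  refine ⟨by rw [List.length_set]; exact hlen, ?_, ?_, ?_, ?_⟩
  · intro t ht
    rw [pvGetDSet]
    by_cases hti : t = i ∧ i < dp.length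
    · rw [if_pos hti, List.length_set]
      exact hrow i hi
    · rw [if_neg hti]; exact hrow t ht
  · intro t ht j' hj'
    rw [pvGetDSet, if_neg (fun hh => by omega)]
    exact hfull t ht j' hj'
  · intro j' hj'
    rw [pvGetDSet, if_pos ⟨rfl, by omega⟩, pvGetDSet]
    by_cases hjj : j' = j + 1 ∧ j + 1 < (dp.getD i []).length
    · rw [if_pos hjj, hjj.1]
    · have : ¬ (j' = j + 1) := by
        intro hh
        exact hjj ⟨hh, by rw [hrow i hi]; omega⟩
      rw [if_neg hjj]
      exact hpart j' (by omega)
  · intro t ht1 ht2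
    rw [pvGetDSet, if_neg (fun hh => by omega)]
    exact hinit t ht1 ht2

theorem pvShiftA (w1 w2 : List Char) (i : Nat) (dp : List (List Int))
    (h : pvInvA w1 w2 i w2.length dp) (hi : i + 1 ≤ w1.length) :
    pvInvA w1 w2 (i+1) 0 dp := by
  obtain ⟨hlen, hrow, hfull, hpart, hinit⟩ := h
  refine ⟨hlen, hrow, ?_, ?_, ?_⟩
  · intro t ht j' hj'
    rcases Nat.lt_or_ge t i with h'|h'
    · exact hfull t h' j' hj'
    · have : t = i := by omega
      subst this
      exact hpart j' hj'
  · intro j' hj'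
    have : j' = 0 := by omega
    subst this
    rw [pvDpF_right0]
    exact hinit (i+1) (by omega) hi
  · intro t ht1 ht2
    exact hinit t (by omega) ht2

theorem pvInnerA (w1 w2 : List Char) (i : Nat) (hi1 : 1 ≤ i) (hi : i ≤ w1.length) :
    ∀ (k j0 : Nat) (dp : List (List Int)), 1 ≤ j0 → j0 + k ≤ w2.length + 1 →
      pvInvA w1 w2 i (j0 - 1) dp →
      pvInvA w1 w2 i (j0 - 1 + k)
        ((List.range' j0 k).foldl (fun dp j =>
          let v : Int :=
            if w1.getD (i-1) ' ' = w2.getD (j-1) ' ' then (dp.getD (i-1) []).getD (j-1) 0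
            else 1 + min (min ((dp.getD (i-1) []).getD j 0) ((dp.getD i []).getD (j-1) 0))
                         ((dp.getD (i-1) []).getD (j-1) 0)
          dp.set i ((dp.getD i []).set j v)) dp) := by
  intro k
  induction k with
  | zero => intro j0 dp h1 h2 h; exact (by omega : j0 - 1 = j0 - 1 + 0) ▸ h
  | succ k ih =>
    intro j0 dp h1 h2 h
    rw [List.range'_succ, List.foldl_cons]
    obtain ⟨j', rfl⟩ : ∃ j', j0 = j' + 1 := ⟨j0 - 1, by omega⟩
    have hstep := pvStepA w1 w2 i j' dp hi1 hi (by omega) h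
    have := ih (j' + 2) _ (by omega) (by omega) hstep
    exact (by omega : j' + 2 - 1 + k = j' + 1 - 1 + (k + 1)) ▸ this

theorem pvOuterA (w1 w2 : List Char) :
    ∀ (k i0 : Nat) (dp : List (List Int)), 1 ≤ i0 → i0 + k ≤ w1.length + 1 →
      pvInvA w1 w2 (i0 - 1) w2.length dp →
      pvInvA w1 w2 (i0 - 1 + k) w2.length
        ((List.range' i0 k).foldl (fun dp i =>
          (List.range' 1 w2.length).foldl (fun dp j =>
            let v : Int :=
              if w1.getD (i-1) ' ' = w2.getD (j-1) ' ' then (dp.getD (i-1) []).getD (j-1) 0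
              else 1 + min (min ((dp.getD (i-1) []).getD j 0) ((dp.getD i []).getD (j-1) 0))
                           ((dp.getD (i-1) []).getD (j-1) 0)
            dp.set i ((dp.getD i []).set j v)) dp) dp) := by
  intro k
  induction k with
  | zero => intro i0 dp h1 h2 h; exact (by omega : i0 - 1 = i0 - 1 + 0) ▸ h
  | succ k ih =>
    intro i0 dp h1 h2 h
    rw [List.range'_succ, List.foldl_cons]
    obtain ⟨i', rfl⟩ : ∃ i', i0 = i' + 1 := ⟨i0 - 1, by omega⟩
    have hshift := pvShiftA w1 w2 i' dp h (by omega)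
    have hinner := pvInnerA w1 w2 (i'+1) (by omega) (by omega) w2.length 1 _ (by omega) (by omega) hshift
    have hinner' := (by omega : 1 - 1 + w2.length = w2.length) ▸ hinner
    have := ih (i' + 2) _ (by omega) (by omega) hinner'
    exact (by omega : i' + 2 - 1 + k = i' + 1 - 1 + (k + 1)) ▸ this

def pvMvP (w1 w2 : List Char) (i j : Nat) (mv : List (List Nat)) : Prop :=
  mv.length = w1.length + 1 ∧
  (∀ t, t ≤ w1.length → (mv.getD t []).length = w2.length + 1) ∧
  (∀ t, t ≤ w1.length → ∀ j', j' ≤ w2.length →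
    (mv.getD t []).getD j' 0 =
      (if t = 0 ∨ j' = 0 then pvMovF w1 w2 t j'
       else if t < i ∨ (t = i ∧ j' ≤ j) then pvMovF w1 w2 t j' else 0))

def pvInvB (w1 w2 : List Char) (i j : Nat) (prev cur : List Int) (mv : List (List Nat)) : Prop :=
  prev.length = w2.length + 1 ∧
  (∀ j', j' ≤ w2.length → prev.getD j' 0 = pvDpF w1 w2 (i-1) j') ∧
  cur.length = w2.length + 1 ∧
  (∀ j', j' ≤ j → cur.getD j' 0 = pvDpF w1 w2 i j') ∧
  pvMvP w1 w2 i j mv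

theorem pvStepB (w1 w2 : List Char) (i j : Nat) (prev cur : List Int) (mv : List (List Nat))
    (hi1 : 1 ≤ i) (hi : i ≤ w1.length) (hj : j + 1 ≤ w2.length)
    (h : pvInvB w1 w2 i j prev cur mv) :
    pvInvB w1 w2 i (j+1)
      prev
      (if w1.getD (i-1) ' ' = w2.getD ((j+1)-1) ' ' then
          (cur.set (j+1) (prev.getD ((j+1)-1) 0), mv)
        else
          let d := prev.getD ((j+1)-1) 0
          let u := prev.getD (j+1) 0
          let l := cur.getD ((j+1)-1) 0
          let best := min d (min u l)
          (cur.set (j+1) (best+1),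
           mv.set i ((mv.getD i []).set (j+1) (if d = best then 1 else if u = best then 2 else 3)))).1
      (if w1.getD (i-1) ' ' = w2.getD ((j+1)-1) ' ' then
          (cur.set (j+1) (prev.getD ((j+1)-1) 0), mv)
        else
          let d := prev.getD ((j+1)-1) 0
          let u := prev.getD (j+1) 0
          let l := cur.getD ((j+1)-1) 0
          let best := min d (min u l)
          (cur.set (j+1) (best+1),
           mv.set i ((mv.getD i []).set (j+1) (if d = best then 1 else if u = best then 2 else 3)))).2 := by
  obtain ⟨hplen, hprev, hclen, hcur, hmlen, hmrow, hment⟩ := h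
  obtain ⟨i', rfl⟩ : ∃ i', i = i' + 1 := ⟨i - 1, by omega⟩
  have hd : prev.getD ((j+1)-1) 0 = pvDpF w1 w2 i' j := by
    simpa using hprev j (by omega)
  have hu : prev.getD (j+1) 0 = pvDpF w1 w2 i' (j+1) := by
    simpa using hprev (j+1) (by omega)
  have hl : cur.getD ((j+1)-1) 0 = pvDpF w1 w2 (i'+1) j := by
    simpa using hcur j (le_refl j)
  by_cases hc : w1.getD (i'+1-1) ' ' = w2.getD ((j+1)-1) ' '
  · rw [if_pos hc]
    refine ⟨hplen, hprev, by rw [List.length_set]; exact hclen, ?_, ?_, ?_, ?_⟩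
    · intro j' hj'
      rw [pvGetDSet]
      by_cases hjj : j' = j + 1 ∧ j + 1 < cur.length
      · rw [if_pos hjj, hjj.1, hd, pvDpF_ss, if_pos (by simpa using hc)]
      · rw [if_neg hjj]
        exact hcur j' (by omega)
    · exact hmlen
    · exact hmrow
    · intro t ht j' hj'
      rw [hment t ht j' hj']
      by_cases hb : t = 0 ∨ j' = 0
      · rw [if_pos hb, if_pos hb]
      · rw [if_neg hb, if_neg hb]
        by_cases hin : t < i' + 1 ∨ (t = i' + 1 ∧ j' ≤ j)
        · rw [if_pos hin, if_pos (by omega)]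
        · by_cases hin2 : t < i' + 1 ∨ (t = i' + 1 ∧ j' ≤ j + 1)
          · rw [if_neg hin, if_pos hin2]
            have : t = i' + 1 ∧ j' = j + 1 := by omega
            rw [this.1, this.2, pvMovF]
            rw [if_neg (by omega), if_neg (by omega), if_pos (by simpa using hc)]
          · rw [if_neg hin, if_neg hin2]
  · rw [if_neg hc]
    refine ⟨hplen, hprev, by rw [List.length_set]; exact hclen, ?_, ?_, ?_, ?_⟩
    · intro j' hj'
      rw [pvGetDSet]
      by_cases hjj : j' = j + 1 ∧ j + 1 < cur.length
      · rw [if_pos hjj, hjj.1, hd, hu, hl, pvDpF_ss, if_neg (by simpa using hc)]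
        omega
      · rw [if_neg hjj]
        exact hcur j' (by omega)
    · rw [List.length_set]; exact hmlen
    · intro t ht
      rw [pvGetDSet]
      by_cases hti : t = i' + 1 ∧ i' + 1 < mv.length
      · rw [if_pos hti, List.length_set]
        exact hmrow (i'+1) hi
      · rw [if_neg hti]
        exact hmrow t ht
    · intro t ht j' hj'
      rw [pvGetDSet]
      by_cases hti : t = i' + 1 ∧ i' + 1 < mv.length
      · rw [if_pos hti, pvGetDSet]
        by_cases hjj : j' = j + 1 ∧ j + 1 < (mv.getD (i'+1) []).length
        · rw [if_pos hjj, hjj.1, hti.1]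
          have hr : (if ((i':Nat)+1 = 0 ∨ j+1 = 0) then pvMovF w1 w2 (i'+1) (j+1)
                     else if (i'+1 < i'+1 ∨ (i'+1 = i'+1 ∧ j+1 ≤ j+1)) then pvMovF w1 w2 (i'+1) (j+1) else 0)
                   = pvMovF w1 w2 (i'+1) (j+1) := by
            rw [if_neg (by omega), if_pos (by omega)]
          rw [hr, hd, hu, hl]
          have hm : pvMovF w1 w2 (i'+1) (j+1) =
              (if pvDpF w1 w2 i' j = min (pvDpF w1 w2 i' j) (min (pvDpF w1 w2 i' (j+1)) (pvDpF w1 w2 (i'+1) j)) then 1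
               else if pvDpF w1 w2 i' (j+1) = min (pvDpF w1 w2 i' j) (min (pvDpF w1 w2 i' (j+1)) (pvDpF w1 w2 (i'+1) j)) then 2 else 3) := by
            rw [pvMovF]
            rw [if_neg (show ¬ ((i':Nat)+1 = 0) from by omega)]
            rw [if_neg (show ¬ ((j:Nat)+1 = 0) from by omega)]
            rw [if_neg (show ¬ (w1.getD (i'+1-1) ' ' = w2.getD (j+1-1) ' ') from hc)]
            simp only [Nat.add_sub_cancel]
          rw [hm]
        · have hrl := hmrow (i'+1) hi
          rw [if_neg hjj, hti.1, hment (i'+1) hi j' hj']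
          by_cases hb : j' = 0
          · rw [if_pos (Or.inr hb), if_pos (Or.inr hb)]
          · have hnb : ¬ ((i':Nat)+1 = 0 ∨ j' = 0) := by omega
            rw [if_neg hnb, if_neg hnb]
            by_cases hin : i' + 1 < i' + 1 ∨ (i' + 1 = i' + 1 ∧ j' ≤ j)
            · rw [if_pos hin,
                  if_pos (show i'+1 < i'+1 ∨ (i'+1 = i'+1 ∧ j' ≤ j+1) from by omega)]
            · rw [if_neg hin,
                  if_neg (show ¬ (i'+1 < i'+1 ∨ (i'+1 = i'+1 ∧ j' ≤ j+1)) from by omega)]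
      · rw [if_neg hti]
        rw [hment t ht j' hj']
        by_cases hb : t = 0 ∨ j' = 0
        · rw [if_pos hb, if_pos hb]
        · rw [if_neg hb, if_neg hb]
          have htne : ¬ t = i' + 1 := by
            intro hh; exact hti ⟨hh, by omega⟩
          by_cases hin : t < i' + 1 ∨ (t = i' + 1 ∧ j' ≤ j)
          · rw [if_pos hin, if_pos (by omega)]
          · rw [if_neg hin, if_neg (by omega)]

theorem pvInnerB (w1 w2 : List Char) (i : Nat) (prev : List Int) (hi1 : 1 ≤ i) (hi : i ≤ w1.length) :
    ∀ (k j0 : Nat) (st2 : List Int × List (List Nat)), 1 ≤ j0 → j0 + k ≤ w2.length + 1 →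
      pvInvB w1 w2 i (j0-1) prev st2.1 st2.2 →
      pvInvB w1 w2 i (j0-1+k) prev
        (((List.range' j0 k).foldl (fun (st2 : List Int × List (List Nat)) (j : Nat) =>
            if w1.getD (i-1) ' ' = w2.getD (j-1) ' ' then
              (st2.1.set j (prev.getD (j-1) 0), st2.2)
            else
              let d := prev.getD (j-1) 0
              let u := prev.getD j 0
              let l := st2.1.getD (j-1) 0
              let best := min d (min u l)
              (st2.1.set j (best+1),
               st2.2.set i ((st2.2.getD i []).set j (if d = best then 1 else if u = best then 2 else 3)))) st2).1)
        (((List.range' j0 k).foldl (fun (st2 : List Int × List (List Nat)) (j : Nat) =>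
            if w1.getD (i-1) ' ' = w2.getD (j-1) ' ' then
              (st2.1.set j (prev.getD (j-1) 0), st2.2)
            else
              let d := prev.getD (j-1) 0
              let u := prev.getD j 0
              let l := st2.1.getD (j-1) 0
              let best := min d (min u l)
              (st2.1.set j (best+1),
               st2.2.set i ((st2.2.getD i []).set j (if d = best then 1 else if u = best then 2 else 3)))) st2).2) := by
  intro k
  induction k with
  | zero => intro j0 st2 h1 h2 h; exact (by omega : j0 - 1 = j0 - 1 + 0) ▸ h
  | succ k ih =>
    intro j0 st2 h1 h2 h
    rw [List.range'_succ, List.foldl_cons]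
    obtain ⟨j', rfl⟩ : ∃ j', j0 = j' + 1 := ⟨j0 - 1, by omega⟩
    have hstep := pvStepB w1 w2 i j' prev st2.1 st2.2 hi1 hi (by omega) h
    have := ih (j' + 2) _ (by omega) (by omega) hstep
    exact (by omega : j' + 2 - 1 + k = j' + 1 - 1 + (k + 1)) ▸ this

theorem pvMvPShift (w1 w2 : List Char) (i : Nat) (mv : List (List Nat))
    (h : pvMvP w1 w2 i w2.length mv) : pvMvP w1 w2 (i+1) 0 mv := by
  obtain ⟨h1, h2, h3⟩ := h
  refine ⟨h1, h2, ?_⟩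
  intro t ht j' hj'
  rw [h3 t ht j' hj']
  by_cases hb : t = 0 ∨ j' = 0
  · rw [if_pos hb, if_pos hb]
  · rw [if_neg hb, if_neg hb]
    by_cases hin : t < i ∨ (t = i ∧ j' ≤ w2.length)
    · rw [if_pos hin, if_pos (by omega)]
    · rw [if_neg hin, if_neg (by omega)]

def pvOutP (w1 w2 : List Char) (i : Nat) (st : List Int × List (List Nat)) : Prop :=
  st.1.length = w2.length + 1 ∧
  (∀ j', j' ≤ w2.length → st.1.getD j' 0 = pvDpF w1 w2 i j') ∧
  pvMvP w1 w2 i w2.length st.2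

theorem pvOuterB (w1 w2 : List Char) :
    ∀ (k i0 : Nat) (st : List Int × List (List Nat)), 1 ≤ i0 → i0 + k ≤ w1.length + 1 →
      pvOutP w1 w2 (i0-1) st →
      pvOutP w1 w2 (i0-1+k)
        ((List.range' i0 k).foldl (fun (st : List Int × List (List Nat)) (i : Nat) =>
          let cur0 : List Int := (i:Int) :: List.replicate w2.length 0
          (List.range' 1 w2.length).foldl (fun (st2 : List Int × List (List Nat)) (j : Nat) =>
            if w1.getD (i-1) ' ' = w2.getD (j-1) ' ' then
              (st2.1.set j (st.1.getD (j-1) 0), st2.2)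
            else
              let d := st.1.getD (j-1) 0
              let u := st.1.getD j 0
              let l := st2.1.getD (j-1) 0
              let best := min d (min u l)
              (st2.1.set j (best+1),
               st2.2.set i ((st2.2.getD i []).set j (if d = best then 1 else if u = best then 2 else 3)))) (cur0, st.2)) st) := by
  intro k
  induction k with
  | zero => intro i0 st h1 h2 h; exact (by omega : i0 - 1 = i0 - 1 + 0) ▸ h
  | succ k ih =>
    intro i0 st h1 h2 h
    rw [List.range'_succ, List.foldl_cons]
    obtain ⟨i', rfl⟩ : ∃ i', i0 = i' + 1 := ⟨i0 - 1, by omega⟩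
    obtain ⟨hl, hp, hm⟩ := h
    have hbase : pvInvB w1 w2 (i'+1) 0 st.1 ((((i':Nat)+1 : Nat):Int) :: List.replicate w2.length 0) st.2 := by
      refine ⟨hl, ?_, by simp, ?_, ?_⟩
      · intro j' hj'
        exact hp j' hj'
      · intro j' hj'
        have : j' = 0 := by omega
        subst this
        rw [pvDpF_right0]
        rfl
      · exact pvMvPShift w1 w2 i' st.2 ((by omega : i' + 1 - 1 = i') ▸ hm)
    have hinner := pvInnerB w1 w2 (i'+1) st.1 (by omega) (by omega) w2.length 1
        ((((i':Nat)+1 : Nat):Int) :: List.replicate w2.length 0, st.2) (by omega) (by omega) hbase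
    obtain ⟨hl2, hp2, hc2len, hc2, hm2⟩ := hinner
    rw [show (1:Nat) - 1 + w2.length = w2.length from by omega] at hm2
    have hout : pvOutP w1 w2 (i'+1) _ :=
      ⟨hc2len, fun j' hj' => hc2 j' (by omega), hm2⟩
    have := ih (i' + 2) _ (by omega) (by omega) hout
    exact (by omega : i' + 2 - 1 + k = i' + 1 - 1 + (k + 1)) ▸ this

theorem pvBtEq (w1 w2 : List Char) (dp : List (List Int)) (mv : List (List Nat))
    (hdp : ∀ t, t ≤ w1.length → ∀ j', j' ≤ w2.length → (dp.getD t []).getD j' 0 = pvDpF w1 w2 t j')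
    (hmv : ∀ t, t ≤ w1.length → ∀ j', j' ≤ w2.length → (mv.getD t []).getD j' 0 = pvMovF w1 w2 t j') :
    ∀ (fuel i j : Nat) (steps : List String), i ≤ w1.length → j ≤ w2.length →
      pvBacktrackA w1 w2 dp fuel i j steps = pvBacktrackB w1 w2 mv fuel i j steps := by
  intro fuel
  induction fuel with
  | zero => intro i j steps hi hj; rfl
  | succ fuel ih =>
    intro i j steps hi hj
    simp only [pvBacktrackA, pvBacktrackB]
    rcases i with _|i' <;> rcases j with _|j'
    · rfl
    · -- i = 0, j = j'+1 : Delete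
      rw [if_pos (by omega : (0:Nat) > 0 ∨ j'+1 > 0), if_pos (by omega : (0:Nat) > 0 ∨ j'+1 > 0)]
      rw [if_neg (by rintro ⟨hh, -⟩; omega), if_neg (by rintro ⟨hh, -⟩; omega),
          if_neg (by rintro ⟨hh, -⟩; omega)]
      have hcode : (mv.getD 0 []).getD (j'+1) 0 = 3 := by
        rw [hmv 0 (by omega) (j'+1) hj, pvMovF, if_pos rfl, if_neg (by omega)]
      rw [hcode]
      rw [if_neg (by omega : ¬ (3:Nat) = 0), if_neg (by omega : ¬ (3:Nat) = 1),
          if_neg (by omega : ¬ (3:Nat) = 2)]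
      exact ih 0 j' _ (by omega) (by omega)
    · -- i = i'+1, j = 0 : Insert
      rw [if_pos (by omega : i'+1 > 0 ∨ (0:Nat) > 0), if_pos (by omega : i'+1 > 0 ∨ (0:Nat) > 0)]
      rw [if_neg (by rintro ⟨-, hh, -⟩; omega), if_neg (by rintro ⟨-, hh, -⟩; omega)]
      rw [if_pos (show i'+1 > 0 ∧ (dp.getD (i'+1) []).getD 0 0 = (dp.getD (i'+1-1) []).getD 0 0 + 1 by
        refine ⟨by omega, ?_⟩
        rw [hdp (i'+1) hi 0 (by omega)]
        rw [show i'+1-1 = i' from rfl, hdp i' (by omega) 0 (by omega), pvDpF_right0, pvDpF_right0]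
        push_cast; ring)]
      have hcode : (mv.getD (i'+1) []).getD 0 0 = 2 := by
        rw [hmv (i'+1) hi 0 (by omega), pvMovF, if_neg (by omega), if_pos rfl]
      rw [hcode]
      rw [if_neg (by omega : ¬ (2:Nat) = 0), if_neg (by omega : ¬ (2:Nat) = 1),
          if_pos (rfl : (2:Nat) = 2)]
      exact ih i' 0 _ (by omega) (by omega)
    · -- i = i'+1, j = j'+1
      rw [if_pos (by omega : i'+1 > 0 ∨ j'+1 > 0), if_pos (by omega : i'+1 > 0 ∨ j'+1 > 0)]
      have hdp0 : (dp.getD (i'+1) []).getD (j'+1) 0 = pvDpF w1 w2 (i'+1) (j'+1) :=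
        hdp (i'+1) hi (j'+1) hj
      have hdpd : (dp.getD (i'+1-1) []).getD (j'+1-1) 0 = pvDpF w1 w2 i' j' := by
        rw [show i'+1-1 = i' from rfl, show j'+1-1 = j' from rfl]
        exact hdp i' (by omega) j' (by omega)
      have hdpu : (dp.getD (i'+1-1) []).getD (j'+1) 0 = pvDpF w1 w2 i' (j'+1) := by
        rw [show i'+1-1 = i' from rfl]
        exact hdp i' (by omega) (j'+1) hj
      have hmv0 : (mv.getD (i'+1) []).getD (j'+1) 0 = pvMovF w1 w2 (i'+1) (j'+1) :=
        hmv (i'+1) hi (j'+1) hj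
      by_cases hc : w1.getD i' ' ' = w2.getD j' ' '
      · -- match
        rw [if_pos ⟨by omega, by omega, hc⟩]
        have hcode : pvMovF w1 w2 (i'+1) (j'+1) = 0 := by
          rw [pvMovF, if_neg (by omega), if_neg (by omega), if_pos (by simpa using hc)]
        rw [hmv0, hcode, if_pos rfl]
        exact ih i' j' _ (by omega) (by omega)
      · have hv : pvDpF w1 w2 (i'+1) (j'+1)
            = 1 + min (min (pvDpF w1 w2 i' (j'+1)) (pvDpF w1 w2 (i'+1) j')) (pvDpF w1 w2 i' j') := by
          rw [pvDpF_ss, if_neg hc]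
        have hm1 : pvMovF w1 w2 (i'+1) (j'+1)
            = (if pvDpF w1 w2 i' j' = min (pvDpF w1 w2 i' j') (min (pvDpF w1 w2 i' (j'+1)) (pvDpF w1 w2 (i'+1) j')) then 1
               else if pvDpF w1 w2 i' (j'+1) = min (pvDpF w1 w2 i' j') (min (pvDpF w1 w2 i' (j'+1)) (pvDpF w1 w2 (i'+1) j')) then 2
               else 3) := by
          simp only [pvMovF, Nat.add_sub_cancel]
          rw [if_neg (by omega : ¬ ((i':Nat)+1 = 0)), if_neg (by omega : ¬ ((j':Nat)+1 = 0)), if_neg hc]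
        rw [if_neg (by rintro ⟨-, -, hh⟩; exact hc hh), hmv0, hm1]
        by_cases h1 : pvDpF w1 w2 i' j' = min (pvDpF w1 w2 i' j') (min (pvDpF w1 w2 i' (j'+1)) (pvDpF w1 w2 (i'+1) j'))
        · -- Replace
          rw [if_pos ⟨by omega, by omega, by rw [hdp0, hdpd, hv]; omega⟩]
          rw [if_pos h1]
          rw [if_neg (by omega : ¬ (1:Nat) = 0), if_pos (rfl : (1:Nat) = 1)]
          exact ih i' j' _ (by omega) (by omega)
        · rw [if_neg (by rintro ⟨-, -, hh⟩; rw [hdp0, hdpd, hv] at hh; omega)]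
          rw [if_neg h1]
          by_cases h2 : pvDpF w1 w2 i' (j'+1) = min (pvDpF w1 w2 i' j') (min (pvDpF w1 w2 i' (j'+1)) (pvDpF w1 w2 (i'+1) j'))
          · -- Insert
            rw [if_pos ⟨by omega, by rw [hdp0, hdpu, hv]; omega⟩]
            rw [if_pos h2]
            rw [if_neg (by omega : ¬ (2:Nat) = 0), if_neg (by omega : ¬ (2:Nat) = 1),
                if_pos (rfl : (2:Nat) = 2)]
            exact ih i' (j'+1) _ (by omega) hj
          · -- Delete
            rw [if_neg (by rintro ⟨-, hh⟩; rw [hdp0, hdpu, hv] at hh; omega)]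
            rw [if_neg h2]
            rw [if_neg (by omega : ¬ (3:Nat) = 0), if_neg (by omega : ¬ (3:Nat) = 1),
                if_neg (by omega : ¬ (3:Nat) = 2)]
            exact ih (i'+1) j' _ hi (by omega)

theorem pvFoldSetLenR {α : Type} (dflt : α) (g : Nat → α → α) (N : Nat) (dp : List α) :
    ((List.range N).foldl (fun d i => d.set i (g i (d.getD i dflt))) dp).length = dp.length := by
  rw [List.range_eq_range']
  exact pvFoldSetLen dflt g (List.range' 0 N) dp

theorem pvFoldSetR {α : Type} (dflt : α) (g : Nat → α → α) (N : Nat) (dp : List α) (t : Nat) :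
    ((List.range N).foldl (fun d i => d.set i (g i (d.getD i dflt))) dp).getD t dflt
      = if 0 ≤ t ∧ t < 0 + N ∧ t < dp.length then g t (dp.getD t dflt) else dp.getD t dflt := by
  rw [List.range_eq_range']
  exact pvFoldSet dflt g N 0 dp t

def pvDp2 (w1 w2 : List Char) : List (List Int) :=
  (List.range (w2.length+1)).foldl (fun dp j => dp.set 0 ((dp.getD 0 []).set j (j:Int)))
    ((List.range (w1.length+1)).foldl (fun dp i => dp.set i ((dp.getD i []).set 0 (i:Int)))
      ((List.range (w1.length+1)).map (fun _ => List.replicate (w2.length+1) (0:Int))))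

def pvDpA (w1 w2 : List Char) : List (List Int) :=
  (List.range' 1 w1.length).foldl (fun dp i =>
    (List.range' 1 w2.length).foldl (fun dp j =>
      dp.set i ((dp.getD i []).set j
        (if w1.getD (i-1) ' ' = w2.getD (j-1) ' ' then (dp.getD (i-1) []).getD (j-1) 0
         else 1 + min (min ((dp.getD (i-1) []).getD j 0) ((dp.getD i []).getD (j-1) 0))
                      ((dp.getD (i-1) []).getD (j-1) 0)))) dp) (pvDp2 w1 w2)

theorem pvDp2_inv (w1 w2 : List Char) : pvInvA w1 w2 0 w2.length (pvDp2 w1 w2) := by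
  have hdp0len : ((List.range (w1.length+1)).map (fun (_ : Nat) => List.replicate (w2.length+1) (0:Int))).length = w1.length + 1 := by simp
  have hdp0get : ∀ t, ((List.range (w1.length+1)).map (fun (_ : Nat) => List.replicate (w2.length+1) (0:Int))).getD t []
      = if t < w1.length + 1 then List.replicate (w2.length+1) (0:Int) else [] := fun t =>
    pvGetDMapRange (fun _ => List.replicate (w2.length+1) (0:Int)) (w1.length+1) t []
  have hdp1len : ((List.range (w1.length+1)).foldl (fun dp i => dp.set i ((dp.getD i []).set 0 (i:Int)))
      ((List.range (w1.length+1)).map (fun _ => List.replicate (w2.length+1) (0:Int)))).length = w1.length + 1 := by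
    exact (pvFoldSetLenR [] (fun i r => r.set 0 (i:Int)) (w1.length+1) _).trans hdp0len
  have hdp1get : ∀ t, ((List.range (w1.length+1)).foldl (fun dp i => dp.set i ((dp.getD i []).set 0 (i:Int)))
        ((List.range (w1.length+1)).map (fun _ => List.replicate (w2.length+1) (0:Int)))).getD t []
      = if 0 ≤ t ∧ t < 0 + (w1.length+1) ∧ t < ((List.range (w1.length+1)).map (fun (_ : Nat) => List.replicate (w2.length+1) (0:Int))).length
        then (((List.range (w1.length+1)).map (fun (_ : Nat) => List.replicate (w2.length+1) (0:Int))).getD t []).set 0 (t:Int)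
        else ((List.range (w1.length+1)).map (fun (_ : Nat) => List.replicate (w2.length+1) (0:Int))).getD t [] := by
    intro t
    exact pvFoldSetR [] (fun i r => r.set 0 (i:Int)) (w1.length+1) _ t
  have hdp1row : ∀ t, t ≤ w1.length → ((List.range (w1.length+1)).foldl (fun dp i => dp.set i ((dp.getD i []).set 0 (i:Int)))
        ((List.range (w1.length+1)).map (fun _ => List.replicate (w2.length+1) (0:Int)))).getD t []
      = (List.replicate (w2.length+1) (0:Int)).set 0 (t:Int) := by
    intro t ht
    rw [hdp1get t, if_pos ⟨by omega, by omega, by rw [hdp0len]; omega⟩, hdp0get t, if_pos (by omega)]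
  have hdp2eq : pvDp2 w1 w2 = ((List.range (w1.length+1)).foldl (fun dp i => dp.set i ((dp.getD i []).set 0 (i:Int)))
        ((List.range (w1.length+1)).map (fun _ => List.replicate (w2.length+1) (0:Int)))).set 0
        ((List.range (w2.length+1)).foldl (fun r j => r.set j (j:Int))
          (((List.range (w1.length+1)).foldl (fun dp i => dp.set i ((dp.getD i []).set 0 (i:Int)))
            ((List.range (w1.length+1)).map (fun _ => List.replicate (w2.length+1) (0:Int)))).getD 0 [])) := by
    rw [pvDp2]
    exact pvFoldSetZero [] (fun j r => r.set j (j:Int)) (List.range (w2.length+1)) _ (by rw [hdp1len]; omega)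
  have hrow0 : (((List.range (w1.length+1)).foldl (fun dp i => dp.set i ((dp.getD i []).set 0 (i:Int)))
        ((List.range (w1.length+1)).map (fun _ => List.replicate (w2.length+1) (0:Int)))).getD 0 [])
      = (List.replicate (w2.length+1) (0:Int)).set 0 ((0:Nat):Int) := hdp1row 0 (by omega)
  have hRlen : ((List.range (w2.length+1)).foldl (fun r j => r.set j (j:Int))
        (((List.range (w1.length+1)).foldl (fun dp i => dp.set i ((dp.getD i []).set 0 (i:Int)))
          ((List.range (w1.length+1)).map (fun _ => List.replicate (w2.length+1) (0:Int)))).getD 0 [])).length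
      = w2.length + 1 := by
    refine (pvFoldSetLenR (0:Int) (fun i _ => (i:Int)) (w2.length+1)
      (((List.range (w1.length+1)).foldl (fun dp i => dp.set i ((dp.getD i []).set 0 (i:Int)))
          ((List.range (w1.length+1)).map (fun _ => List.replicate (w2.length+1) (0:Int)))).getD 0 [])).trans ?_
    rw [hrow0, List.length_set, List.length_replicate]
  have hRget : ∀ j', j' ≤ w2.length → ((List.range (w2.length+1)).foldl (fun r j => r.set j (j:Int))
        (((List.range (w1.length+1)).foldl (fun dp i => dp.set i ((dp.getD i []).set 0 (i:Int)))
          ((List.range (w1.length+1)).map (fun _ => List.replicate (w2.length+1) (0:Int)))).getD 0 [])).getD j' 0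
      = (j' : Int) := by
    intro j' hj'
    exact (pvFoldSetR (0:Int) (fun i _ => (i:Int)) (w2.length+1)
      (((List.range (w1.length+1)).foldl (fun dp i => dp.set i ((dp.getD i []).set 0 (i:Int)))
          ((List.range (w1.length+1)).map (fun _ => List.replicate (w2.length+1) (0:Int)))).getD 0 []) j').trans
      (by rw [if_pos (⟨by omega, by omega, by rw [hrow0, List.length_set, List.length_replicate]; omega⟩ :
        0 ≤ j' ∧ j' < 0 + (w2.length+1) ∧ j' < (((List.range (w1.length+1)).foldl (fun dp i => dp.set i ((dp.getD i []).set 0 (i:Int)))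
          ((List.range (w1.length+1)).map (fun _ => List.replicate (w2.length+1) (0:Int)))).getD 0 []).length)])
  refine ⟨?_, ?_, ?_, ?_, ?_⟩
  · rw [hdp2eq, List.length_set]; exact hdp1len
  · intro t ht
    rw [hdp2eq, pvGetDSet]
    by_cases h0 : t = 0 ∧ 0 < ((List.range (w1.length+1)).foldl (fun dp i => dp.set i ((dp.getD i []).set 0 (i:Int)))
        ((List.range (w1.length+1)).map (fun _ => List.replicate (w2.length+1) (0:Int)))).length
    · rw [if_pos h0]; exact hRlen
    · rw [if_neg h0, hdp1row t ht, List.length_set, List.length_replicate]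
  · intro t ht; omega
  · intro j' hj'
    rw [hdp2eq, pvGetDSet, if_pos ⟨rfl, by rw [hdp1len]; omega⟩, hRget j' hj', pvDpF_left0]
  · intro t ht1 ht2
    rw [hdp2eq, pvGetDSet, if_neg (by rintro ⟨hh, -⟩; omega), hdp1row t ht2, pvGetDSet,
        if_pos ⟨rfl, by rw [List.length_replicate]; omega⟩]

theorem pvDpA_get (w1 w2 : List Char) :
    ∀ t, t ≤ w1.length → ∀ j', j' ≤ w2.length →
      (((pvDpA w1 w2)).getD t []).getD j' 0 = pvDpF w1 w2 t j' := by
  have h := pvOuterA w1 w2 w1.length 1 (pvDp2 w1 w2) (by omega) (by omega) (pvDp2_inv w1 w2)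
  rw [show (1:Nat) - 1 + w1.length = w1.length from by omega] at h
  obtain ⟨-, -, hfull, hpart, -⟩ := h
  intro t ht j' hj'
  rcases Nat.lt_or_ge t w1.length with h'|h'
  · exact hfull t h' j' hj'
  · have : t = w1.length := by omega
    subst this
    exact hpart j' hj'

def pvPrev0 (w2 : List Char) : List Int := (List.range (w2.length+1)).map (fun (j : Nat) => (j:Int))

def pvMv2 (w1 w2 : List Char) : List (List Nat) :=
  (List.range' 1 w2.length).foldl (fun mv j => mv.set 0 ((mv.getD 0 []).set j 3))
    ((List.range' 1 w1.length).foldl (fun mv i => mv.set i ((mv.getD i []).set 0 2))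
      ((List.range (w1.length+1)).map (fun _ => List.replicate (w2.length+1) (0:Nat))))

def pvStB (w1 w2 : List Char) : List Int × List (List Nat) :=
  (List.range' 1 w1.length).foldl (fun (st : List Int × List (List Nat)) (i : Nat) =>
    (List.range' 1 w2.length).foldl (fun (st2 : List Int × List (List Nat)) (j : Nat) =>
      if w1.getD (i-1) ' ' = w2.getD (j-1) ' ' then (st2.1.set j (st.1.getD (j-1) 0), st2.2)
      else
        let d := st.1.getD (j-1) 0
        let u := st.1.getD j 0
        let l := st2.1.getD (j-1) 0
        let best := min d (min u l)
        (st2.1.set j (best+1),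
         st2.2.set i ((st2.2.getD i []).set j (if d = best then 1 else if u = best then 2 else 3))))
      ((i:Int) :: List.replicate w2.length 0, st.2)) (pvPrev0 w2, pvMv2 w1 w2)

theorem pvB_base (w1 w2 : List Char) : pvOutP w1 w2 0 (pvPrev0 w2, pvMv2 w1 w2) := by
  have hmv0len : ((List.range (w1.length+1)).map (fun (_ : Nat) => List.replicate (w2.length+1) (0:Nat))).length = w1.length + 1 := by simp
  have hmv0get : ∀ t, ((List.range (w1.length+1)).map (fun (_ : Nat) => List.replicate (w2.length+1) (0:Nat))).getD t []
      = if t < w1.length + 1 then List.replicate (w2.length+1) (0:Nat) else [] := fun t =>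
    pvGetDMapRange (fun _ => List.replicate (w2.length+1) (0:Nat)) (w1.length+1) t []
  have hmv1len : ((List.range' 1 w1.length).foldl (fun mv i => mv.set i ((mv.getD i []).set 0 2))
      ((List.range (w1.length+1)).map (fun _ => List.replicate (w2.length+1) (0:Nat)))).length = w1.length + 1 := by
    exact (pvFoldSetLen [] (fun _ r => r.set 0 2) (List.range' 1 w1.length) _).trans hmv0len
  have hmv1get : ∀ t, ((List.range' 1 w1.length).foldl (fun mv i => mv.set i ((mv.getD i []).set 0 2))
        ((List.range (w1.length+1)).map (fun _ => List.replicate (w2.length+1) (0:Nat)))).getD t []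
      = if 1 ≤ t ∧ t < 1 + w1.length ∧ t < ((List.range (w1.length+1)).map (fun (_ : Nat) => List.replicate (w2.length+1) (0:Nat))).length
        then (((List.range (w1.length+1)).map (fun (_ : Nat) => List.replicate (w2.length+1) (0:Nat))).getD t []).set 0 2
        else ((List.range (w1.length+1)).map (fun (_ : Nat) => List.replicate (w2.length+1) (0:Nat))).getD t [] := fun t =>
    pvFoldSet [] (fun _ r => r.set 0 2) w1.length 1 _ t
  have hrow0 : ((List.range' 1 w1.length).foldl (fun mv i => mv.set i ((mv.getD i []).set 0 2))
        ((List.range (w1.length+1)).map (fun _ => List.replicate (w2.length+1) (0:Nat)))).getD 0 []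
      = List.replicate (w2.length+1) (0:Nat) := by
    rw [hmv1get 0, if_neg (by omega), hmv0get 0, if_pos (by omega)]
  have hmv2eq : pvMv2 w1 w2 = ((List.range' 1 w1.length).foldl (fun mv i => mv.set i ((mv.getD i []).set 0 2))
        ((List.range (w1.length+1)).map (fun _ => List.replicate (w2.length+1) (0:Nat)))).set 0
        ((List.range' 1 w2.length).foldl (fun r j => r.set j 3)
          (((List.range' 1 w1.length).foldl (fun mv i => mv.set i ((mv.getD i []).set 0 2))
            ((List.range (w1.length+1)).map (fun _ => List.replicate (w2.length+1) (0:Nat)))).getD 0 [])) := by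
    rw [pvMv2]
    exact pvFoldSetZero [] (fun j r => r.set j 3) (List.range' 1 w2.length) _ (by rw [hmv1len]; omega)
  have hR3len : ((List.range' 1 w2.length).foldl (fun r j => r.set j 3)
        (((List.range' 1 w1.length).foldl (fun mv i => mv.set i ((mv.getD i []).set 0 2))
          ((List.range (w1.length+1)).map (fun _ => List.replicate (w2.length+1) (0:Nat)))).getD 0 [])).length
      = w2.length + 1 := by
    refine (pvFoldSetLen (0:Nat) (fun _ _ => 3) (List.range' 1 w2.length)
      (((List.range' 1 w1.length).foldl (fun mv i => mv.set i ((mv.getD i []).set 0 2))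
        ((List.range (w1.length+1)).map (fun _ => List.replicate (w2.length+1) (0:Nat)))).getD 0 [])).trans ?_
    rw [hrow0, List.length_replicate]
  have hrepl : ∀ j', j' ≤ w2.length → (List.replicate (w2.length+1) (0:Nat)).getD j' 0 = 0 := by
    intro j' hj'
    rw [List.getD_eq_getElem?_getD, List.getElem?_replicate, if_pos (by omega)]
    rfl
  have hR3get : ∀ j', j' ≤ w2.length → ((List.range' 1 w2.length).foldl (fun r j => r.set j 3)
        (((List.range' 1 w1.length).foldl (fun mv i => mv.set i ((mv.getD i []).set 0 2))
          ((List.range (w1.length+1)).map (fun _ => List.replicate (w2.length+1) (0:Nat)))).getD 0 [])).getD j' 0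
      = if 1 ≤ j' then 3 else 0 := by
    intro j' hj'
    refine (pvFoldSet (0:Nat) (fun _ _ => 3) w2.length 1
      (((List.range' 1 w1.length).foldl (fun mv i => mv.set i ((mv.getD i []).set 0 2))
        ((List.range (w1.length+1)).map (fun _ => List.replicate (w2.length+1) (0:Nat)))).getD 0 []) j').trans ?_
    by_cases h1 : 1 ≤ j'
    · rw [if_pos ⟨h1, by omega, by rw [hrow0, List.length_replicate]; omega⟩, if_pos h1]
    · rw [if_neg (by omega), if_neg h1, hrow0, hrepl j' hj']
  refine ⟨by simp [pvPrev0], ?_, ?_, ?_, ?_⟩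
  · intro j' hj'
    rw [pvPrev0, pvGetDMapRange, if_pos (by omega), pvDpF_left0]
  · rw [hmv2eq, List.length_set]; exact hmv1len
  · intro t ht
    rw [hmv2eq, pvGetDSet]
    by_cases h0 : t = 0 ∧ 0 < ((List.range' 1 w1.length).foldl (fun mv i => mv.set i ((mv.getD i []).set 0 2))
        ((List.range (w1.length+1)).map (fun _ => List.replicate (w2.length+1) (0:Nat)))).length
    · rw [if_pos h0]; exact hR3len
    · rw [if_neg h0, hmv1get t]
      by_cases h1 : 1 ≤ t ∧ t < 1 + w1.length ∧ t < ((List.range (w1.length+1)).map (fun (_ : Nat) => List.replicate (w2.length+1) (0:Nat))).length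
      · rw [if_pos h1, List.length_set, hmv0get t, if_pos (by omega), List.length_replicate]
      · rw [if_neg h1, hmv0get t, if_pos (by omega), List.length_replicate]
  · intro t ht j' hj'
    rw [hmv2eq, pvGetDSet]
    by_cases h0 : t = 0 ∧ 0 < ((List.range' 1 w1.length).foldl (fun mv i => mv.set i ((mv.getD i []).set 0 2))
        ((List.range (w1.length+1)).map (fun _ => List.replicate (w2.length+1) (0:Nat)))).length
    · rw [if_pos h0, hR3get j' hj', h0.1, if_pos (Or.inl rfl)]
      by_cases hj0 : j' = 0
      · rw [if_neg (by omega), hj0, pvMovF, if_pos rfl, if_pos rfl]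
      · rw [if_pos (by omega), pvMovF, if_pos rfl, if_neg hj0]
    · have ht1 : 1 ≤ t := by
        by_contra hh
        exact h0 ⟨by omega, by rw [hmv1len]; omega⟩
      rw [if_neg h0, hmv1get t, if_pos ⟨ht1, by omega, by rw [hmv0len]; omega⟩,
          hmv0get t, if_pos (by omega), pvGetDSet]
      by_cases hj0 : j' = 0
      · rw [if_pos ⟨hj0, by rw [List.length_replicate]; omega⟩, if_pos (Or.inr hj0), hj0,
            pvMovF, if_neg (by omega), if_pos rfl]
      · rw [if_neg (by rintro ⟨hh, -⟩; exact hj0 hh), hrepl j' hj',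
            if_neg (by rintro (hh|hh) <;> omega), if_neg (by rintro (hh|⟨hh,-⟩) <;> omega)]

theorem pvStB_out (w1 w2 : List Char) : pvOutP w1 w2 w1.length (pvStB w1 w2) := by
  have h := pvOuterB w1 w2 w1.length 1 (pvPrev0 w2, pvMv2 w1 w2) (by omega) (by omega) (pvB_base w1 w2)
  rw [show (1:Nat) - 1 + w1.length = w1.length from by omega] at h
  exact h

theorem pvStB_mv (w1 w2 : List Char) :
    ∀ t, t ≤ w1.length → ∀ j', j' ≤ w2.length →
      ((pvStB w1 w2).2.getD t []).getD j' 0 = pvMovF w1 w2 t j' := by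
  obtain ⟨-, -, -, -, hent⟩ := pvStB_out w1 w2
  intro t ht j' hj'
  rw [hent t ht j' hj']
  by_cases hb : t = 0 ∨ j' = 0
  · rw [if_pos hb]
  · rw [if_neg hb, if_pos (by omega)]

theorem pvMainEq (word1 word2 : String) :
    edit_distance_with_Backtracking word1 word2 = edit_distance_with_Backtracking_alt word1 word2 := by
  simp only [edit_distance_with_Backtracking, edit_distance_with_Backtracking_alt]
  exact congrArg₂ Prod.mk
    ((pvDpA_get word1.toList word2.toList word1.toList.length le_rfl word2.toList.length le_rfl).trans
      ((pvStB_out word1.toList word2.toList).2.1 word2.toList.length le_rfl).symm)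
    (congrArg List.reverse
      (pvBtEq word1.toList word2.toList (pvDpA word1.toList word2.toList) (pvStB word1.toList word2.toList).2
        (pvDpA_get word1.toList word2.toList) (pvStB_mv word1.toList word2.toList)
        (word1.toList.length + word2.toList.length) word1.toList.length word2.toList.length [] le_rfl le_rfl))

-- ===== VERDICT (by name: the statement is the Claim_ definition above) =====
theorem edit_distance_with_Backtracking_spec : Claim_equal_edit_distance_with_Backtracking := by
  intro word1 word2 _
  exact pvMainEq word1 word2
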